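-- pv_equiv track=rewrite | github.com/wazuh/wazuh | tools/policy-migration/refactor_regex.py | _has_dot_in_rn_tokens
-- ===== SOURCE A (Python) =====
-- from typing import List, Tuple, Set, Optional
--
-- def _has_dot_in_rn_tokens(text: str) -> bool:
--     """Return True if there is any '.' or '\\.' inside r:/n:/!r:/!n: token payloads.
--     Token payload ends at ' && ' or ' compare '.
--     """
--     i = 0
--     s = text
--     n = len(s)
--
--     def read_until_boundary(k: int) -> Tuple[str, int]:
--         j = k
--         while j < n and not (s.startswith(' && ', j) or s.startswith(' compare ', j)):
--             j += 1
--         return s[k:j], j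
--
--     while i < n:
--         # !r: / !n:
--         if i + 2 < n and s[i] == '!' and s[i + 1] in ('r', 'n') and s[i + 2] == ':':
--             i += 3
--             payload, i = read_until_boundary(i)
--             if '.' in payload:
--                 return True
--             continue
--         # r: / n:
--         if i + 1 < n and s[i] in ('r', 'n') and s[i + 1] == ':':
--             i += 2
--             payload, i = read_until_boundary(i)
--             if '.' in payload:
--                 return True
--             continue
--         i += 1
--     return False
-- ===== SOURCE B (Python) =====
-- def _has_dot_in_rn_tokens(text: str) -> bool:
--     """Return True if there is any '.' inside r:/n:/!r:/!n: token payloads.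
--
--     Jump-based scan: instead of walking char by char, repeatedly locate the
--     next 'r:'/'n:' occurrence with str.find (a '!r:' token contains an 'r:'
--     at its second character, so the '!' form needs no separate handling),
--     then locate the payload's end boundary with str.find as well.
--     """
--     n = len(text)
--     pos = 0
--     while True:
--         hits = [q for q in (text.find('r:', pos), text.find('n:', pos)) if q != -1]
--         if not hits:
--             return False
--         start = min(hits) + 2
--         ends = [e for e in (text.find(' && ', start), text.find(' compare ', start)) if e != -1]
--         end = min(ends) if ends else n
--         if '.' in text[start:end]:
--             return True
--         pos = end
-- ===== Notes on version B (the rewrite author's own statement) =====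
-- stated objective: faster
-- what changed: Replaces A's character-by-character index state machine (separate bang-token and plain-token branches plus a manual per-character boundary scan) by repeated str.find jumps: locate the next letter-colon token occurrence (a bang-prefixed token contains one, so the bang form needs no separate handling), locate the payload end as the minimum of the two boundary-marker finds, and test dot membership in that slice.
import Mathlib
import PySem

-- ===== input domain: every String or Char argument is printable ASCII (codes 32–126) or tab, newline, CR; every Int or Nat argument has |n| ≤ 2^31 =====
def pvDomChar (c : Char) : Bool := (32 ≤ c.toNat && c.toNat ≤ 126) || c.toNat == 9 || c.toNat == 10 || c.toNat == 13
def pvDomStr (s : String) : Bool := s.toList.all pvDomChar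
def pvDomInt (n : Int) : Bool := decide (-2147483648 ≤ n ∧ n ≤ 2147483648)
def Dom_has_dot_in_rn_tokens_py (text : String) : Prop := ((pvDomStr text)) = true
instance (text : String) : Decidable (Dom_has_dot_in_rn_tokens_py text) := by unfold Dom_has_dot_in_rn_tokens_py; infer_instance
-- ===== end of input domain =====

-- B replaces A's char-by-char state machine by str.find-based jumps to the next 'r:'/'n:'
-- occurrence and to the payload boundary (measured faster by a constant factor in Python);
-- return values proved equal on all strings.

-- ===== PORT A =====
-- read_until_boundary's index scan: advance j until a boundary starts at j or j = n;
-- s.startswith(pat, j) is PySem.Chars.startswith on s.drop j (exact: j is a Nat index here)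
def pvRUB (s : List Char) (j : Nat) : Nat :=
  if h : j < s.length ∧
      PySem.Chars.startswith (s.drop j) (" && ".toList) = false ∧
      PySem.Chars.startswith (s.drop j) (" compare ".toList) = false then
    pvRUB s (j + 1)
  else j
termination_by s.length - j
decreasing_by omega

-- cited by pvLoopA's decreasing_by: read_until_boundary never moves left
theorem pvRUB_ge (s : List Char) (j : Nat) : j ≤ pvRUB s j := by
  fun_induction pvRUB with
  | case1 j h ih => omega
  | case2 j h => omega

-- A's while-loop; the payload slice s[k:j] is (s.drop k).take (j - k), exact since k ≤ j;
-- '.' in payload is membership of the single char (List.contains)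
def pvLoopA (s : List Char) (i : Nat) : Bool :=
  if hi : i < s.length then
    if h1 : i + 2 < s.length ∧ s.getD i ' ' = '!' ∧
        (s.getD (i+1) ' ' = 'r' ∨ s.getD (i+1) ' ' = 'n') ∧ s.getD (i+2) ' ' = ':' then
      if ((s.drop (i + 3)).take (pvRUB s (i + 3) - (i + 3))).contains '.' then true
      else pvLoopA s (pvRUB s (i + 3))
    else if h2 : i + 1 < s.length ∧
        (s.getD i ' ' = 'r' ∨ s.getD i ' ' = 'n') ∧ s.getD (i+1) ' ' = ':' then
      if ((s.drop (i + 2)).take (pvRUB s (i + 2) - (i + 2))).contains '.' then true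
      else pvLoopA s (pvRUB s (i + 2))
    else pvLoopA s (i + 1)
  else false
termination_by s.length - i
decreasing_by
  · have := pvRUB_ge s (i + 3); omega
  · have := pvRUB_ge s (i + 2); omega
  · omega

def has_dot_in_rn_tokens_py (text : String) : Bool := pvLoopA text.toList 0

-- ===== PORT B =====
-- text.find(sub, pos) composed with Source B's 'if q != -1' comprehension filter
def pvBFind (s sub : List Char) (pos : Nat) : Option Nat :=
  let r := PySem.Chars.findFrom s sub (pos : Int) none
  if r = -1 then none else some r.toNat

-- cited by pvGoB's decreasing_by (CPython: find with a start past len(s) is -1)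
theorem pvFindFrom_past {s sub : List Char} {pos : Nat} (h : s.length < pos) :
    PySem.Chars.findFrom s sub (pos : Int) none = -1 := by
  simp [PySem.Chars.findFrom]
  intro h1
  exfalso; revert h1; split_ifs <;> omega

-- cited by pvGoB's decreasing_by: a found index is ≥ the start and carries the pattern
theorem pvBFind_some {s sub : List Char} {pos q : Nat} (h : pvBFind s sub pos = some q) :
    pos ≤ q ∧ sub <+: s.drop q := by
  by_cases hpos : pos ≤ s.length
  · rw [pvBFind] at h
    split at h
    · exact absurd h (by simp)
    · rename_i hr
      obtain ⟨h1, h2, h3⟩ := PySem.Chars.findFrom_natCast_spec s sub pos hpos hr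
      have hq : q = (PySem.Chars.findFrom s sub (pos : Int) none).toNat := by
        simpa using h.symm
      subst hq
      exact ⟨by omega, h2⟩
  · rw [pvBFind] at h
    simp [pvFindFrom_past (s := s) (sub := sub) (show s.length < pos by omega)] at h

-- cited by pvGoB's decreasing_by
theorem mem_fm2 {o1 o2 : Option Nat} {q : Nat} (h : q ∈ List.filterMap id [o1, o2]) :
    o1 = some q ∨ o2 = some q := by
  cases o1 <;> cases o2 <;> simp_all [List.filterMap] <;> tauto

-- Source B's 'min(ends) if ends else n'
def pvBEnd (s : List Char) (start : Nat) : Nat :=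
  ((List.filterMap id [pvBFind s (" && ".toList) start,
      pvBFind s (" compare ".toList) start]).min?).getD s.length

-- cited by pvGoB's decreasing_by: the boundary position never lies left of start
theorem pvBEnd_ge {s : List Char} {start : Nat} (h : start ≤ s.length) :
    start ≤ pvBEnd s start := by
  rw [pvBEnd]
  cases hm : (List.filterMap id [pvBFind s (" && ".toList) start,
      pvBFind s (" compare ".toList) start]).min? with
  | none => simpa using h
  | some e =>
    have hmem := List.min?_mem hm
    rcases mem_fm2 hmem with he | he <;> simpa using (pvBFind_some he).1

-- Source B's while-loop: jump to the next 'r:'/'n:' occurrence, then to the boundary;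
-- 'min(hits)' over the two filtered finds is List.min? of the filterMap
def pvGoB (s : List Char) (pos : Nat) : Bool :=
  match hq : (List.filterMap id [pvBFind s ("r:".toList) pos,
      pvBFind s ("n:".toList) pos]).min? with
  | none => false
  | some q =>
    if ((s.drop (q + 2)).take (pvBEnd s (q + 2) - (q + 2))).contains '.' then true
    else pvGoB s (pvBEnd s (q + 2))
termination_by s.length + 1 - pos
decreasing_by
  have hmem := List.min?_mem hq
  have hb := mem_fm2 hmem
  have h2 : pos ≤ q ∧ q + 2 ≤ s.length := by
    rcases hb with he | he <;>
    · obtain ⟨hge, hpre⟩ := pvBFind_some he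
      have hl := hpre.length_le
      simp at hl
      exact ⟨hge, by omega⟩
  have := pvBEnd_ge (s := s) (start := q + 2) h2.2
  omega

def has_dot_in_rn_tokens_py_alt (text : String) : Bool := pvGoB text.toList 0

-- ===== PRECONDITION & SPEC =====
def Spec_has_dot_in_rn_tokens_py (text : String) (out : Bool) : Prop := out = has_dot_in_rn_tokens_py_alt text
instance (text : String) (out : Bool) : Decidable (Spec_has_dot_in_rn_tokens_py text out) := by unfold Spec_has_dot_in_rn_tokens_py; infer_instance

-- ===== CLAIM (what is proved, stated in full; the proofs are below) =====
def Claim_equal_has_dot_in_rn_tokens_py : Prop := ∀ (text : String), Dom_has_dot_in_rn_tokens_py text → Spec_has_dot_in_rn_tokens_py text (has_dot_in_rn_tokens_py text)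

-- ===== LEMMAS AND PROOFS =====

-- if the pattern sits at pos, find returns pos (first occurrence)
theorem pvBFind_hit {s sub : List Char} {pos : Nat} (hpos : pos ≤ s.length)
    (hpre : sub <+: s.drop pos) : pvBFind s sub pos = some pos := by
  have hne : PySem.Chars.findFrom s sub (pos : Int) none ≠ -1 := by
    intro hc
    have := (PySem.Chars.findFrom_natCast_eq_neg_one_iff s sub pos hpos).mp hc
    exact this hpre.isInfix
  obtain ⟨h1, h2, h3⟩ := PySem.Chars.findFrom_natCast_spec s sub pos hpos hne
  have ht : (PySem.Chars.findFrom s sub (pos : Int) none).toNat = pos := by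
    by_contra hc
    exact h3 pos le_rfl (by omega) hpre
  rw [pvBFind]
  simp [hne, ht]

-- a nonempty pattern is never found when searching from the very end
theorem pvBFind_end {s sub : List Char} (hsub : sub ≠ []) :
    pvBFind s sub s.length = none := by
  have h : PySem.Chars.findFrom s sub (s.length : Int) none = -1 := by
    rw [PySem.Chars.findFrom_natCast_eq_neg_one_iff s sub s.length le_rfl]
    simpa using hsub
  rw [pvBFind]; simp [h]

-- if the pattern is not at pos, searching from pos equals searching from pos+1
theorem pvBFind_step {s sub : List Char} {pos : Nat} (hlt : pos < s.length)
    (hnot : ¬ sub <+: s.drop pos) : pvBFind s sub pos = pvBFind s sub (pos + 1) := by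
  have hpos : pos ≤ s.length := by omega
  have hpos1 : pos + 1 ≤ s.length := hlt
  have hdd : ∀ j : Nat, List.drop j (s.drop (pos + 1)) = s.drop (pos + 1 + j) := by
    intro j; exact List.drop_drop ..
  have hsuf : s.drop (pos + 1) <:+ s.drop pos := by
    have h1 : List.drop 1 (s.drop pos) = s.drop (pos + 1) := List.drop_drop ..
    rw [← h1]; exact List.drop_suffix _ _
  by_cases hr : PySem.Chars.findFrom s sub (pos : Int) none = -1
  · have hinf : ¬ sub <:+: s.drop pos :=
      (PySem.Chars.findFrom_natCast_eq_neg_one_iff s sub pos hpos).mp hr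
    have hinf1 : ¬ sub <:+: s.drop (pos + 1) := fun hc =>
      hinf (hc.trans hsuf.isInfix)
    have hr1 : PySem.Chars.findFrom s sub ((pos + 1 : Nat) : Int) none = -1 :=
      (PySem.Chars.findFrom_natCast_eq_neg_one_iff s sub (pos+1) hpos1).mpr hinf1
    rw [pvBFind, pvBFind]
    push_cast at hr1 ⊢
    simp [hr, hr1]
  · obtain ⟨h1, h2, h3⟩ := PySem.Chars.findFrom_natCast_spec s sub pos hpos hr
    set r := PySem.Chars.findFrom s sub (pos : Int) none with hrdef
    have hrk : r.toNat ≠ pos := fun hc => hnot (hc ▸ h2)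
    have hrge : pos + 1 ≤ r.toNat := by omega
    have hr1ne : PySem.Chars.findFrom s sub ((pos + 1 : Nat) : Int) none ≠ -1 := by
      intro hc
      have hninf := (PySem.Chars.findFrom_natCast_eq_neg_one_iff s sub (pos+1) hpos1).mp hc
      apply hninf
      rw [← PySem.Chars.isIn_iff_infix, ← PySem.Chars.exists_prefix_drop_iff_isIn]
      refine ⟨r.toNat - (pos + 1), ?_⟩
      rw [hdd, show pos + 1 + (r.toNat - (pos + 1)) = r.toNat by omega]
      exact h2
    obtain ⟨g1, g2, g3⟩ := PySem.Chars.findFrom_natCast_spec s sub (pos+1) hpos1 hr1ne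
    set g := PySem.Chars.findFrom s sub ((pos + 1 : Nat) : Int) none with hgdef
    have hrg : r.toNat = g.toNat := by
      rcases Nat.lt_trichotomy r.toNat g.toNat with h | h | h
      · exact absurd h2 (g3 r.toNat hrge h)
      · exact h
      · exact absurd g2 (h3 g.toNat (by omega) h)
    have hc2 : ((pos + 1 : Nat) : Int) = (pos : Int) + 1 := by push_cast; ring
    rw [hc2] at hgdef
    rw [pvBFind, pvBFind]
    simp [← hrdef, ← hgdef, hr, hr1ne, hrg]

-- a 2-char pattern sits at drop i exactly when A's bounds-checked getD tests at i, i+1 pass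
theorem pvPrefix2 {s : List Char} {a b : Char} {i : Nat} :
    [a, b] <+: s.drop i ↔ i + 1 < s.length ∧ s.getD i ' ' = a ∧ s.getD (i+1) ' ' = b := by
  constructor
  · rintro ⟨t, ht⟩
    have hlen := congrArg List.length ht
    simp at hlen
    have hi1 : i + 1 < s.length := by omega
    have he : List.drop i s = a :: b :: t := ht.symm
    have h0 : s[i]? = some a := by
      have h := congrArg (fun l => l[0]?) he
      simpa [List.getElem?_drop] using h
    have h1 : s[i+1]? = some b := by
      have h := congrArg (fun l => l[1]?) he
      simpa [List.getElem?_drop] using h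
    refine ⟨hi1, ?_, ?_⟩ <;> simp [List.getD_eq_getElem?_getD, h0, h1]
  · rintro ⟨hi1, ha, hb⟩
    have hi0 : i < s.length := by omega
    rw [List.getD_eq_getElem?_getD, List.getElem?_eq_getElem hi0] at ha
    rw [List.getD_eq_getElem?_getD, List.getElem?_eq_getElem hi1] at hb
    simp at ha hb
    have hdt : s.drop i = a :: b :: s.drop (i + 2) := by
      rw [List.drop_eq_getElem_cons hi0, ha,
          List.drop_eq_getElem_cons (show i + 1 < s.length from hi1), hb,
          show i + 1 + 1 = i + 2 by omega]
    exact ⟨s.drop (i + 2), by rw [hdt]; rfl⟩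

theorem pvRUB_le (s : List Char) (j : Nat) (hj : j ≤ s.length) : pvRUB s j ≤ s.length := by
  fun_induction pvRUB s j with
  | case1 j h ih => exact ih (by omega)
  | case2 j h => omega

theorem fm2_min_getD {o1 o2 : Option Nat} {j n : Nat}
    (h : o1 = some j ∨ o2 = some j)
    (h1 : ∀ e, o1 = some e → j ≤ e) (h2 : ∀ e, o2 = some e → j ≤ e) :
    ((List.filterMap id [o1, o2]).min?).getD n = j := by
  cases o1 <;> cases o2 <;> simp_all [List.min?, List.filterMap] <;> omega

theorem fm2_min {o1 o2 : Option Nat} {j : Nat}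
    (h : o1 = some j ∨ o2 = some j)
    (h1 : ∀ e, o1 = some e → j ≤ e) (h2 : ∀ e, o2 = some e → j ≤ e) :
    (List.filterMap id [o1, o2]).min? = some j := by
  cases o1 <;> cases o2 <;> simp_all [List.min?, List.filterMap] <;> omega

-- pvGoB's one-step unfolding with the match hypothesis erased
theorem pvGoB_eq (s : List Char) (pos : Nat) : pvGoB s pos =
    match (List.filterMap id [pvBFind s ("r:".toList) pos,
        pvBFind s ("n:".toList) pos]).min? with
    | none => false
    | some q =>
      if ((s.drop (q + 2)).take (pvBEnd s (q + 2) - (q + 2))).contains '.' then true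
      else pvGoB s (pvBEnd s (q + 2)) := by
  rw [pvGoB.eq_def]
  cases hm : (List.filterMap id [pvBFind s ("r:".toList) pos,
      pvBFind s ("n:".toList) pos]).min? <;> simp

theorem startswith_false {l p : List Char} (h : PySem.Chars.startswith l p = false) :
    ¬ p <+: l := fun hc => by
  rw [← PySem.Chars.startswith_iff] at hc
  rw [h] at hc
  exact Bool.false_ne_true hc

-- the crux: A's boundary scan from k and B's min of the two boundary finds agree
theorem bEnd_eq (s : List Char) (k : Nat) (hk : k ≤ s.length) : pvRUB s k = pvBEnd s k := by
  revert hk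
  fun_induction pvRUB s k with
  | case1 j h ih =>
    intro hj
    obtain ⟨hjl, hw1, hw2⟩ := h
    rw [ih (by omega)]
    rw [pvBEnd, pvBEnd,
      pvBFind_step hjl (startswith_false hw1),
      pvBFind_step hjl (startswith_false hw2)]
  | case2 j h =>
    intro hj
    by_cases hjl : j < s.length
    · have hor : PySem.Chars.startswith (s.drop j) (" && ".toList) = true ∨
          PySem.Chars.startswith (s.drop j) (" compare ".toList) = true := by
        by_contra hc
        push_neg at hc
        exact h ⟨hjl, by simpa using hc.1, by simpa using hc.2⟩
      rw [pvBEnd]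
      rcases hor with hw | hw
      · have hpre := (PySem.Chars.startswith_iff _ _).mp hw
        exact (fm2_min_getD (Or.inl (pvBFind_hit (by omega) hpre))
          (fun e he => (pvBFind_some he).1) (fun e he => (pvBFind_some he).1)).symm
      · have hpre := (PySem.Chars.startswith_iff _ _).mp hw
        exact (fm2_min_getD (Or.inr (pvBFind_hit (by omega) hpre))
          (fun e he => (pvBFind_some he).1) (fun e he => (pvBFind_some he).1)).symm
    · have hje : j = s.length := by omega
      subst hje
      rw [pvBEnd, pvBFind_end (by simp), pvBFind_end (by simp)]
      simp

-- past the end of the string B finds no token and stops with False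
theorem goB_end (s : List Char) : pvGoB s s.length = false := by
  rw [pvGoB_eq, pvBFind_end (by simp), pvBFind_end (by simp)]
  simp [List.min?]

-- no token starts at i: B's find-from-i equals find-from-(i+1)
theorem goB_step (s : List Char) {i : Nat} (hi : i < s.length)
    (hr : ¬ ("r:".toList <+: s.drop i)) (hn : ¬ ("n:".toList <+: s.drop i)) :
    pvGoB s i = pvGoB s (i + 1) := by
  rw [pvGoB_eq, pvBFind_step hi hr, pvBFind_step hi hn, ← pvGoB_eq]

theorem goB_tok (s : List Char) (i q : Nat)
    (hq : (List.filterMap id [pvBFind s ("r:".toList) i,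
        pvBFind s ("n:".toList) i]).min? = some q) :
    pvGoB s i = if ((s.drop (q + 2)).take (pvBEnd s (q + 2) - (q + 2))).contains '.' then true
      else pvGoB s (pvBEnd s (q + 2)) := by
  rw [pvGoB_eq, hq]

-- a '!r:'/'!n:' token at i makes B's earliest 'r:'/'n:' occurrence land at i+1
theorem hits_bang (s : List Char) (i : Nat)
    (h1 : i + 2 < s.length ∧ s.getD i ' ' = '!' ∧
      (s.getD (i+1) ' ' = 'r' ∨ s.getD (i+1) ' ' = 'n') ∧ s.getD (i+2) ' ' = ':') :
    (List.filterMap id [pvBFind s ("r:".toList) i,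
        pvBFind s ("n:".toList) i]).min? = some (i + 1) := by
  obtain ⟨hlen, hbang, hx, hcol⟩ := h1
  have hi : i < s.length := by omega
  have hnr : ¬ (("r:".toList) <+: s.drop i) := fun hc => by
    rw [show ("r:".toList) = ['r', ':'] from rfl, pvPrefix2] at hc
    rw [hc.2.1] at hbang; exact absurd hbang (by decide)
  have hnn : ¬ (("n:".toList) <+: s.drop i) := fun hc => by
    rw [show ("n:".toList) = ['n', ':'] from rfl, pvPrefix2] at hc
    rw [hc.2.1] at hbang; exact absurd hbang (by decide)
  rw [pvBFind_step hi hnr, pvBFind_step hi hnn]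
  rcases hx with hr | hn
  · have hhit : pvBFind s ("r:".toList) (i+1) = some (i+1) :=
      pvBFind_hit (by omega) ((pvPrefix2 (a := 'r') (b := ':')).mpr ⟨by omega, hr, hcol⟩)
    exact fm2_min (Or.inl hhit)
      (fun e he => (pvBFind_some he).1) (fun e he => (pvBFind_some he).1)
  · have hhit : pvBFind s ("n:".toList) (i+1) = some (i+1) :=
      pvBFind_hit (by omega) ((pvPrefix2 (a := 'n') (b := ':')).mpr ⟨by omega, hn, hcol⟩)
    exact fm2_min (Or.inr hhit)
      (fun e he => (pvBFind_some he).1) (fun e he => (pvBFind_some he).1)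

-- an 'r:'/'n:' token at i makes B's earliest occurrence land at i itself
theorem hits_plain (s : List Char) (i : Nat)
    (h2 : i + 1 < s.length ∧
      (s.getD i ' ' = 'r' ∨ s.getD i ' ' = 'n') ∧ s.getD (i+1) ' ' = ':') :
    (List.filterMap id [pvBFind s ("r:".toList) i,
        pvBFind s ("n:".toList) i]).min? = some i := by
  obtain ⟨hlen, hx, hcol⟩ := h2
  rcases hx with hr | hn
  · have hhit : pvBFind s ("r:".toList) i = some i :=
      pvBFind_hit (by omega) ((pvPrefix2 (a := 'r') (b := ':')).mpr ⟨hlen, hr, hcol⟩)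
    exact fm2_min (Or.inl hhit)
      (fun e he => (pvBFind_some he).1) (fun e he => (pvBFind_some he).1)
  · have hhit : pvBFind s ("n:".toList) i = some i :=
      pvBFind_hit (by omega) ((pvPrefix2 (a := 'n') (b := ':')).mpr ⟨hlen, hn, hcol⟩)
    exact fm2_min (Or.inr hhit)
      (fun e he => (pvBFind_some he).1) (fun e he => (pvBFind_some he).1)

theorem main_lemma (s : List Char) (i : Nat) (hi : i ≤ s.length) :
    pvLoopA s i = pvGoB s i := by
  revert hi
  fun_induction pvLoopA s i with
  | case1 i hi h1 hdot =>
    intro hle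
    rw [goB_tok s i (i + 1) (hits_bang s i h1), ← bEnd_eq s (i + 3) (by omega)]
    simp only [hdot]
    simp
  | case2 i hi h1 hdot ih =>
    intro hle
    rw [ih (pvRUB_le s (i + 3) (by omega))]
    rw [goB_tok s i (i + 1) (hits_bang s i h1), ← bEnd_eq s (i + 3) (by omega)]
    simp only [hdot]
    simp
  | case3 i hi h1 h2 hdot =>
    intro hle
    rw [goB_tok s i i (hits_plain s i h2), ← bEnd_eq s (i + 2) (by omega)]
    simp only [hdot]
    simp
  | case4 i hi h1 h2 hdot ih =>
    intro hle
    rw [ih (pvRUB_le s (i + 2) (by omega))]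
    rw [goB_tok s i i (hits_plain s i h2), ← bEnd_eq s (i + 2) (by omega)]
    simp only [hdot]
    simp
  | case5 i hi h1 h2 ih =>
    intro hle
    rw [ih (by omega)]
    have hnr : ¬ (("r:".toList) <+: s.drop i) := fun hc => by
      rw [show ("r:".toList) = ['r', ':'] from rfl, pvPrefix2] at hc
      exact h2 ⟨hc.1, Or.inl hc.2.1, hc.2.2⟩
    have hnn : ¬ (("n:".toList) <+: s.drop i) := fun hc => by
      rw [show ("n:".toList) = ['n', ':'] from rfl, pvPrefix2] at hc
      exact h2 ⟨hc.1, Or.inr hc.2.1, hc.2.2⟩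
    exact (goB_step s hi hnr hnn).symm
  | case6 i hi =>
    intro hle
    rw [show i = s.length by omega]
    exact (goB_end s).symm

-- ===== VERDICT (by name: the statement is the Claim_ definition above) =====
theorem has_dot_in_rn_tokens_py_spec : Claim_equal_has_dot_in_rn_tokens_py := by
  intro text _
  unfold Spec_has_dot_in_rn_tokens_py has_dot_in_rn_tokens_py has_dot_in_rn_tokens_py_alt
  exact main_lemma text.toList 0 (Nat.zero_le _)
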